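-- pv_equiv track=rewrite | github.com/VetaLIch123/Programming | LABA7/2.py | max_repeats
-- ===== SOURCE A (Python) =====
-- def max_repeats(password: str, chars: str) -> int:
--     max_same = 1
--     current = 1
--     for i in range(1, len(password)):
--         if password[i] in chars and password[i] == password[i - 1]:
--             current += 1
--             if current > max_same:
--                 max_same = current
--         else:
--             current = 1
--     return max_same
-- ===== SOURCE B (Python) =====
-- def max_repeats(password: str, chars: str) -> int:
--     # Two-pointer run scan: find each maximal run of equal characters,
--     # and keep the longest whose character is in chars (floor 1).
--     best = 1
--     n = len(password)
--     i = 0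
--     while i < n:
--         j = i + 1
--         while j < n and password[j] == password[i]:
--             j += 1
--         if password[i] in chars and j - i > best:
--             best = j - i
--         i = j
--     return best
-- ===== Notes on version B (the rewrite author's own statement) =====
-- stated objective: alternative
-- what changed: A keeps a running counter and running maximum updated at every index; B is a two-pointer scan that finds each maximal run of equal characters at once and does one membership test and one comparison per run instead of per character.
import Mathlib
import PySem

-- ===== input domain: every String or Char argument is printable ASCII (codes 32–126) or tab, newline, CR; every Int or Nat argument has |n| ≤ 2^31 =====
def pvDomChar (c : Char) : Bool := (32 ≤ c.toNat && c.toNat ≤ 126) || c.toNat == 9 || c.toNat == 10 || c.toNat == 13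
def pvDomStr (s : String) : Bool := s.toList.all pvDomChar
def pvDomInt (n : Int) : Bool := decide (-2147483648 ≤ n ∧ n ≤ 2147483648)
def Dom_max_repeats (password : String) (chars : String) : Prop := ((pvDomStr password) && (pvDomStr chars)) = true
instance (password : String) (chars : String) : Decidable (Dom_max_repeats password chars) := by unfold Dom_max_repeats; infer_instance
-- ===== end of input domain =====

-- B replaces A's per-index running counter with a two-pointer scan over maximal runs
-- of equal characters (objective: alternative decomposition, one membership test per run).

-- ===== PORT A =====
-- one iteration of A's for-loop: state = (max_same, current), index i
def stepA (l cs : List Char) (st : Int × Int) (i : Int) : Int × Int :=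
  match PySem.List.pyGet? l i, PySem.List.pyGet? l (i - 1) with
  | some ci, some cp =>
      if PySem.Chars.isIn [ci] cs ∧ ci = cp then
        let current := st.2 + 1
        (if current > st.1 then current else st.1, current)
      else (st.1, 1)
  | _, _ => st   -- unreachable guard: Python would raise IndexError, but every i ∈ range(1, len) is in range

def max_repeats (password : String) (chars : String) : Int :=
  let l := password.toList
  ((PySem.List.pyRange 1 (l.length : Int) 1).foldl (stepA l chars.toList) (1, 1)).1

-- ===== PORT B =====
-- inner while loop: advance j while l[j] equals the run character c
def bInner (l : List Char) (c : Char) (n j : Int) : Int :=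
  if _h : j < n ∧ PySem.List.pyGet? l j = some c then bInner l c n (j + 1) else j
termination_by (n - j).toNat
decreasing_by omega

theorem bInner_ge (l : List Char) (c : Char) (n j : Int) : j ≤ bInner l c n j := by
  unfold bInner
  split
  · have := bInner_ge l c n (j + 1); omega
  · omega
termination_by (n - j).toNat
decreasing_by omega

-- outer while loop: best so far, current position i
def bOuter (l cs : List Char) (n best i : Int) : Int :=
  if _h : i < n then
    match PySem.List.pyGet? l i with
    | some c =>
        let j := bInner l c n (i + 1)
        bOuter l cs n (if PySem.Chars.isIn [c] cs ∧ j - i > best then j - i else best) j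
    | none => best   -- unreachable guard: 0 ≤ i < n
  else best
termination_by (n - i).toNat
decreasing_by have := bInner_ge l c n (i + 1); omega

def max_repeats_alt (password : String) (chars : String) : Int :=
  let l := password.toList
  bOuter l chars.toList (l.length : Int) 1 0

-- ===== PRECONDITION & SPEC =====
def Spec_max_repeats (password : String) (chars : String) (out : Int) : Prop := out = max_repeats_alt password chars
instance (password : String) (chars : String) (out : Int) : Decidable (Spec_max_repeats password chars out) := by unfold Spec_max_repeats; infer_instance

-- ===== CLAIM (what is proved, stated in full; the proofs are below) =====
def Claim_equal_max_repeats : Prop := ∀ (password : String) (chars : String), Dom_max_repeats password chars → Spec_max_repeats password chars (max_repeats password chars)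

-- ===== LEMMAS AND PROOFS =====

-- bInner returns the end of the run: everything in [j, r) is c, and r = n or l[r] ≠ c
theorem bInner_spec (l : List Char) (c : Char) (n j : Int) (hn : n = (l.length : Int))
    (h0 : 0 ≤ j) (hj : j ≤ n) :
    bInner l c n j ≤ n ∧
    (∀ t, j ≤ t → t < bInner l c n j → PySem.List.pyGet? l t = some c) ∧
    (bInner l c n j = n ∨ PySem.List.pyGet? l (bInner l c n j) ≠ some c) := by
  rw [bInner]
  split
  case isTrue h =>
    have IH := bInner_spec l c n (j + 1) hn (by omega) (by omega)
    refine ⟨IH.1, ?_, IH.2.2⟩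
    intro t ht1 ht2
    rcases eq_or_lt_of_le ht1 with rfl | hlt
    · exact h.2
    · exact IH.2.1 t (by omega) ht2
  case isFalse h =>
    refine ⟨hj, by omega, ?_⟩
    by_cases hjn : j = n
    · exact Or.inl hjn
    · exact Or.inr (fun hc => h ⟨by omega, hc⟩)
termination_by (n - j).toNat

-- fold of stepA over a run chunk whose character is in cs
theorem chunk_in (l cs : List Char) (c : Char) (hin : PySem.Chars.isIn [c] cs = true) :
    ∀ (d : Nat) (t0 M cur : Int), cur ≤ M →
    (∀ t, t0 ≤ t → t < t0 + d → PySem.List.pyGet? l t = some c ∧ PySem.List.pyGet? l (t - 1) = some c) →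
    (PySem.List.pyRange t0 (t0 + d) 1).foldl (stepA l cs) (M, cur)
      = (if cur + d > M then cur + d else M, cur + d) := by
  intro d
  induction d with
  | zero =>
    intro t0 M cur hle _
    rw [PySem.List.pyRange_one_eq_nil (by omega)]
    simp only [List.foldl_nil, Int.natCast_zero, add_zero]
    have : ¬ cur > M := by omega
    simp [this]
  | succ d IH =>
    intro t0 M cur hle hrun
    have hcons : PySem.List.pyRange t0 (t0 + (d + 1 : Nat)) 1
        = t0 :: PySem.List.pyRange (t0 + 1) (t0 + (d + 1 : Nat)) 1 :=
      PySem.List.pyRange_one_cons (by push_cast; omega)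
    rw [hcons, List.foldl_cons]
    obtain ⟨h1, h2⟩ := hrun t0 (by omega) (by push_cast; omega)
    have hstep : stepA l cs (M, cur) t0
        = (if cur + 1 > M then cur + 1 else M, cur + 1) := by
      unfold stepA; rw [h1, h2]; simp only [hin, true_and, if_true]
    rw [hstep]
    have hend : t0 + ((d + 1 : Nat) : Int) = (t0 + 1) + (d : Nat) := by push_cast; omega
    rw [hend]
    rw [IH (t0 + 1) _ (cur + 1) (by split <;> omega)
      (fun t ht1 ht2 => hrun t (by omega) (by push_cast at ht2 ⊢; omega))]
    have : cur + 1 + (d : Nat) = cur + ((d + 1 : Nat) : Int) := by push_cast; omega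
    rw [this]
    split_ifs <;> simp only [Prod.mk.injEq] <;> constructor <;> first | trivial | (push_cast; omega)

-- fold of stepA over a run chunk whose character is not in cs
theorem chunk_out (l cs : List Char) (c : Char) (hin : PySem.Chars.isIn [c] cs = false) :
    ∀ (d : Nat) (t0 M : Int),
    (∀ t, t0 ≤ t → t < t0 + d → PySem.List.pyGet? l t = some c ∧ PySem.List.pyGet? l (t - 1) = some c) →
    (PySem.List.pyRange t0 (t0 + d) 1).foldl (stepA l cs) (M, 1) = (M, 1) := by
  intro d
  induction d with
  | zero =>
    intro t0 M _
    rw [PySem.List.pyRange_one_eq_nil (by omega)]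
    rfl
  | succ d IH =>
    intro t0 M hrun
    have hcons : PySem.List.pyRange t0 (t0 + (d + 1 : Nat)) 1
        = t0 :: PySem.List.pyRange (t0 + 1) (t0 + (d + 1 : Nat)) 1 :=
      PySem.List.pyRange_one_cons (by push_cast; omega)
    rw [hcons, List.foldl_cons]
    obtain ⟨h1, h2⟩ := hrun t0 (by omega) (by push_cast; omega)
    have hstep : stepA l cs (M, 1) t0 = (M, 1) := by
      unfold stepA; rw [h1, h2]; simp [hin]
    rw [hstep]
    have hend : t0 + ((d + 1 : Nat) : Int) = (t0 + 1) + (d : Nat) := by push_cast; omega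
    rw [hend]
    exact IH (t0 + 1) M (fun t ht1 ht2 => hrun t (by omega) (by push_cast at ht2 ⊢; omega))

-- a boundary step (l[i] ≠ l[i-1]) resets current to 1
theorem step_boundary (l cs : List Char) (M cur i : Int) (ci cp : Char)
    (hi : PySem.List.pyGet? l i = some ci) (hp : PySem.List.pyGet? l (i - 1) = some cp)
    (hne : ci ≠ cp) :
    stepA l cs (M, cur) i = (M, 1) := by
  unfold stepA
  rw [hi, hp]
  simp [hne]

theorem bOuter_stop (l cs : List Char) (n best i : Int) (h : ¬ i < n) :
    bOuter l cs n best i = best := by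
  rw [bOuter, dif_neg h]

theorem bOuter_step (l cs : List Char) (n best i : Int) (hlt : i < n) (c : Char)
    (hc : PySem.List.pyGet? l i = some c) :
    bOuter l cs n best i
      = bOuter l cs n
          (if PySem.Chars.isIn [c] cs ∧ bInner l c n (i + 1) - i > best
           then bInner l c n (i + 1) - i else best)
          (bInner l c n (i + 1)) := by
  conv_lhs => rw [bOuter]
  rw [dif_pos hlt, hc]

-- main loop correspondence
theorem main_loop (l cs : List Char) :
    ∀ (i : Int), 0 ≤ i → i ≤ (l.length : Int) → ∀ (m : Int), 1 ≤ m →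
    ((PySem.List.pyRange (i + 1) (l.length : Int) 1).foldl (stepA l cs) (m, 1)).1
      = bOuter l cs (l.length : Int) m i := by
  intro i h0 hn m hm
  by_cases hlt : i < (l.length : Int)
  · have hilen : i.toNat < l.length := by omega
    have hic : PySem.List.pyGet? l i = some l[i.toNat] :=
      PySem.List.pyGet?_eq_some_getElem l h0 hlt
    set c := l[i.toNat] with hc
    set j := bInner l c (l.length : Int) (i + 1) with hjdef
    have hge : i + 1 ≤ j := bInner_ge l c (l.length : Int) (i + 1)
    have hs := bInner_spec l c (l.length : Int) (i + 1) rfl (by omega) (by omega)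
    have hrun : ∀ t, i + 1 ≤ t → t < j →
        PySem.List.pyGet? l t = some c ∧ PySem.List.pyGet? l (t - 1) = some c := by
      intro t ht1 ht2
      refine ⟨hs.2.1 t ht1 ht2, ?_⟩
      rcases eq_or_lt_of_le ht1 with rfl | hgt
      · simpa using hic
      · exact hs.2.1 (t - 1) (by omega) (by omega)
    have hsplit : PySem.List.pyRange (i + 1) (l.length : Int) 1
        = PySem.List.pyRange (i + 1) j 1 ++ PySem.List.pyRange j (l.length : Int) 1 :=
      PySem.List.pyRange_one_append _ j _ (by omega) hs.1
    rw [hsplit, List.foldl_append]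
    set d : Nat := (j - (i + 1)).toNat with hddef
    have hd : j = (i + 1) + (d : Int) := by omega
    have hrange : PySem.List.pyRange (i + 1) j 1
        = PySem.List.pyRange (i + 1) ((i + 1) + (d : Int)) 1 := by rw [← hd]
    -- the state after the run chunk
    have hchunk : (PySem.List.pyRange (i + 1) j 1).foldl (stepA l cs) (m, 1)
        = (if PySem.Chars.isIn [c] cs ∧ j - i > m then j - i else m,
           if PySem.Chars.isIn [c] cs then j - i else 1) := by
      cases hin : PySem.Chars.isIn [c] cs with
      | true =>
        rw [hrange, chunk_in l cs c hin d (i + 1) m 1 hm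
          (fun t ht1 ht2 => hrun t ht1 (by omega))]
        simp only [true_and]
        split_ifs <;> simp only [Prod.mk.injEq] <;> constructor <;>
          first | trivial | omega
      | false =>
        rw [hrange, chunk_out l cs c hin d (i + 1) m
          (fun t ht1 ht2 => hrun t ht1 (by omega))]
        simp only [Bool.false_eq_true, false_and, if_false]
    rw [hchunk]
    have hbest1 : 1 ≤ (if PySem.Chars.isIn [c] cs ∧ j - i > m then j - i else m) := by
      split_ifs <;> omega
    by_cases hjn : j = (l.length : Int)
    · rw [bOuter_step l cs _ m i hlt c hic, ← hjdef,
        bOuter_stop l cs _ _ j (by omega),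
        hjn, PySem.List.pyRange_one_eq_nil (by omega), List.foldl_nil]
    · -- boundary step at j, then recurse
      have hjlen : j.toNat < l.length := by omega
      have hbc : PySem.List.pyGet? l j = some l[j.toNat] :=
        PySem.List.pyGet?_eq_some_getElem l (by omega) (by omega)
      have hprev : PySem.List.pyGet? l (j - 1) = some c := by
        rcases eq_or_lt_of_le hge with heq | hgt
        · rw [← heq]; simpa using hic
        · exact hs.2.1 (j - 1) (by omega) (by omega)
      have hne : l[j.toNat] ≠ c := by
        intro e
        rcases hs.2.2 with h | h
        · exact hjn h
        · exact h (by rw [hbc, e])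
      rw [PySem.List.pyRange_one_cons (by omega), List.foldl_cons,
        step_boundary l cs _ _ j l[j.toNat] c hbc hprev hne]
      rw [main_loop l cs j (by omega) (by omega) _ hbest1]
      rw [bOuter_step l cs _ m i hlt c hic, ← hjdef]
  · have hieq : i = (l.length : Int) := by omega
    rw [hieq, PySem.List.pyRange_one_eq_nil (by omega), List.foldl_nil,
      bOuter_stop l cs _ m _ (by omega)]
termination_by i => ((l.length : Int) - i).toNat
decreasing_by
  have hb := bInner_ge l l[i.toNat] ((l.length : Int)) (i + 1)
  omega

-- ===== VERDICT (by name: the statement is the Claim_ definition above) =====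
theorem max_repeats_spec : Claim_equal_max_repeats := by
  intro password chars _
  unfold Spec_max_repeats max_repeats max_repeats_alt
  have h := main_loop password.toList chars.toList 0 le_rfl (by positivity) 1 le_rfl
  simpa using h
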